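-- pv_equiv track=rewrite | github.com/ho8ae/Coding-TEST | 프로그래머스/2/49993. 스킬트리/스킬트리.py | is_able
-- ===== SOURCE A (Python) =====
-- def is_able(l,s): #['C','B','D'],"BACDE"
--     # BACDE visited 만들기
--     arr = list(s) # ['B','A','C','D','E']
--     stack = []
--
--     for i in range(len(arr)):
--         if arr[i] in l:
--             stack.append(arr[i])
--
--
--
--     if l[:len(stack)] == stack:
--         return True
--     else:
--         return False
-- ===== SOURCE B (Python) =====
-- def is_able(l, s):
--     rank = {skill: i for i, skill in enumerate(l)}
--     expected = 0
--     for c in s: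
--         r = rank.get(c)
--         if r is None:
--             continue
--         if r != expected:
--             return False
--         expected += 1
--     return True
-- ===== Notes on version B (the rewrite author's own statement) =====
-- stated objective: faster
-- what changed: Replaces the filter-into-a-stack-then-compare-to-a-prefix-of-l algorithm (with an O(len(l)) membership scan per character) by building a skill->rank dict index of l once and making a single pass over s that checks each indexed character's rank against an incrementing counter. Pre_ excludes inputs where a character of s is a duplicated element of l, on which the dict index collapses the duplicate keys (last index wins) and A's prefix comparison of the duplicated list is an equally accidental choice.
-- outside the precondition, e.g. on is_able(['A', 'A'], 'AA'): A returns True, B returns False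
import Mathlib
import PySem

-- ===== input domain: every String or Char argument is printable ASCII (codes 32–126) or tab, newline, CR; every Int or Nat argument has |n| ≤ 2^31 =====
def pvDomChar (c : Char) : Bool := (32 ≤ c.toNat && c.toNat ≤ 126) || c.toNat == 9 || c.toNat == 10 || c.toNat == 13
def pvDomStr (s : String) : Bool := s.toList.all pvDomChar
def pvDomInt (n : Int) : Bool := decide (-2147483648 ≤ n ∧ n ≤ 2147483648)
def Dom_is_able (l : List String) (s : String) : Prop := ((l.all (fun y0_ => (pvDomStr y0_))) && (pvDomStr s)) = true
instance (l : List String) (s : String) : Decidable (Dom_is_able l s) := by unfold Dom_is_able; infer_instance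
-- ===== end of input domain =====

-- B replaces A's per-character membership scan over l plus stack/prefix comparison with a
-- skill->rank dict index built once and a single rank-checking pass over s (asymptotically faster).


-- ===== PORT A =====
-- arr = list(s): Python's characters are 1-char strings, so each Char becomes String.ofList [c];
-- 'for i in range(len(arr))' visits arr's elements in order, ported as a foldl over arr.
def is_able (l : List String) (s : String) : Bool :=
  let arr := s.toList.map (fun c => String.ofList [c])
  let stack := arr.foldl (fun st x => if l.contains x then st ++ [x] else st) []
  if l.take stack.length == stack then true else false

-- ===== PORT B =====
-- rank = {skill: i for i, skill in enumerate(l)}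
def buildRank (l : List String) : PySem.Dict String Int :=
  (PySem.List.enumerate l).foldl (fun d p => d.insert p.2 p.1) PySem.Dict.empty

-- the loop of Source B: walk s with the expected-rank counter
def altLoop (rank : PySem.Dict String Int) : List Char → Int → Bool
  | [], _ => true
  | c :: rest, expected =>
    match rank.get? (String.ofList [c]) with
    | none => altLoop rank rest expected
    | some r => if r ≠ expected then false else altLoop rank rest (expected + 1)

def is_able_alt (l : List String) (s : String) : Bool :=
  altLoop (buildRank l) s.toList 0

-- ===== PRECONDITION & SPEC =====
-- Pre_ excludes inputs where some character of s is a DUPLICATED element of l: there the dict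
-- index collapses the duplicate keys (last index wins) while A prefix-compares the duplicated
-- list — neither behaviour is specified for a duplicated skill tree, so those inputs are outside the claim.
def Pre_is_able (l : List String) (s : String) : Prop :=
  ∀ x ∈ l, 1 < l.count x → PySem.Str.len x = 1 → PySem.Str.isIn x s = false
instance (l : List String) (s : String) : Decidable (Pre_is_able l s) := by unfold Pre_is_able; infer_instance
def pvWitness_is_able : List String × String := (["A"], "A")

def Spec_is_able (l : List String) (s : String) (out : Bool) : Prop := out = is_able_alt l s
instance (l : List String) (s : String) (out : Bool) : Decidable (Spec_is_able l s out) := by unfold Spec_is_able; infer_instance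

-- ===== CLAIM (what is proved, stated in full; the proofs are below) =====
def Claim_equal_is_able : Prop := ∀ (l : List String) (s : String), Dom_is_able l s → Pre_is_able l s → Spec_is_able l s (is_able l s)

-- ===== LEMMAS AND PROOFS =====

theorem foldl_filter_append (l : List String) :
    ∀ (arr acc : List String),
      arr.foldl (fun st x => if l.contains x then st ++ [x] else st) acc
        = acc ++ arr.filter (fun x => l.contains x) := by
  intro arr
  induction arr with
  | nil => simp
  | cons a rest ih =>
    intro acc
    simp only [List.contains_iff_mem, decide_eq_true_eq] at ih
    by_cases h : a ∈ l <;> simp [List.foldl_cons, List.filter_cons, h, ih]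

theorem take_beq_iff_prefix (l st : List String) :
    (l.take st.length == st) = decide (st <+: l) := by
  by_cases h : st <+: l
  · have := (List.prefix_iff_eq_take.mp h).symm
    simp [h, this]
  · simp [h]
    intro heq
    exact absurd (List.prefix_iff_eq_take.mpr heq.symm) h

theorem pre_char_count (l : List String) (s : String) (hpre : Pre_is_able l s) :
    ∀ c ∈ s.toList, l.count (String.ofList [c]) ≤ 1 := by
  intro c hc
  by_contra h
  rw [Nat.not_le] at h
  have hx : String.ofList [c] ∈ l := List.count_pos_iff.mp (by omega)
  have hlen : PySem.Str.len (String.ofList [c]) = 1 := by simp [PySem.Str.len_eq]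
  have hin := hpre _ hx h hlen
  rw [← Bool.not_eq_true, PySem.Str.isIn_iff_infix] at hin
  apply hin
  obtain ⟨l1, l2, hsplit⟩ := List.append_of_mem hc
  refine ⟨l1, l2, ?_⟩
  simp [hsplit]

theorem foldl_enum_get?_of_not_mem (x : String) :
    ∀ (l : List String) (s0 : Int) (d : PySem.Dict String Int), x ∉ l →
      ((PySem.List.enumerate l s0).foldl (fun d p => d.insert p.2 p.1) d).get? x = d.get? x := by
  intro l
  induction l with
  | nil => intro s0 d _; simp [PySem.List.enumerate_nil]
  | cons a rest ih =>
    intro s0 d hx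
    rw [PySem.List.enumerate_cons, List.foldl_cons]
    rw [ih (s0 + 1) _ (fun h => hx (List.mem_cons_of_mem a h))]
    apply PySem.Dict.get?_insert_of_ne
    intro h
    exact hx (h ▸ List.mem_cons_self)

theorem foldl_enum_get?_of_count_one (x : String) :
    ∀ (l : List String) (s0 : Int) (d : PySem.Dict String Int) (j : Nat)
      (hj : j < l.length), l[j] = x → l.count x = 1 →
      ((PySem.List.enumerate l s0).foldl (fun d p => d.insert p.2 p.1) d).get? x = some (s0 + j) := by
  intro l
  induction l with
  | nil => intro _ _ j hj; simp at hj
  | cons a rest ih =>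
    intro s0 d j hj hjx hcnt
    rw [PySem.List.enumerate_cons, List.foldl_cons]
    cases j with
    | zero =>
      simp only [List.getElem_cons_zero] at hjx
      subst hjx
      have hrest : a ∉ rest := by
        intro hmem
        have h1 : 1 ≤ rest.count a := List.count_pos_iff.mpr hmem
        rw [List.count_cons_self] at hcnt
        omega
      rw [foldl_enum_get?_of_not_mem a rest (s0 + 1) _ hrest]
      simp [PySem.Dict.get?_insert_self]
    | succ j' =>
      simp only [List.getElem_cons_succ] at hjx
      have hj' : j' < rest.length := by simp [List.length_cons] at hj; omega
      have hmem : x ∈ rest := hjx ▸ List.getElem_mem hj'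
      have hax : a ≠ x := by
        intro h
        subst h
        have h1 : 1 ≤ rest.count a := List.count_pos_iff.mpr hmem
        rw [List.count_cons_self] at hcnt
        omega
      have hcnt' : rest.count x = 1 := by
        rw [List.count_cons_of_ne hax] at hcnt
        exact hcnt
      have := ih (s0 + 1) (d.insert a s0) j' hj' hjx hcnt'
      rw [this]
      congr 1
      omega

theorem count_one_index_unique (x : String) :
    ∀ (l : List String) (i j : Nat) (hi : i < l.length) (hj : j < l.length),
      l.count x = 1 → l[i] = x → l[j] = x → i = j := by
  intro l
  induction l with
  | nil => intro i j hi; simp at hi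
  | cons a rest ih =>
    intro i j hi hj hcnt hix hjx
    cases i with
    | zero =>
      cases j with
      | zero => rfl
      | succ j' =>
        simp only [List.getElem_cons_zero] at hix
        simp only [List.getElem_cons_succ] at hjx
        subst hix
        have hj' : j' < rest.length := by simp [List.length_cons] at hj; omega
        have hmem : a ∈ rest := hjx ▸ List.getElem_mem hj'
        have h1 : 1 ≤ rest.count a := List.count_pos_iff.mpr hmem
        rw [List.count_cons_self] at hcnt
        omega
    | succ i' =>
      cases j with
      | zero =>
        simp only [List.getElem_cons_zero] at hjx
        simp only [List.getElem_cons_succ] at hix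
        subst hjx
        have hi' : i' < rest.length := by simp [List.length_cons] at hi; omega
        have hmem : a ∈ rest := hix ▸ List.getElem_mem hi'
        have h1 : 1 ≤ rest.count a := List.count_pos_iff.mpr hmem
        rw [List.count_cons_self] at hcnt
        omega
      | succ j' =>
        simp only [List.getElem_cons_succ] at hix hjx
        have hi' : i' < rest.length := by simp [List.length_cons] at hi; omega
        have hj' : j' < rest.length := by simp [List.length_cons] at hj; omega
        have hmem : x ∈ rest := hix ▸ List.getElem_mem hi'
        have hax : a ≠ x := by
          intro h
          subst h
          have h1 : 1 ≤ rest.count a := List.count_pos_iff.mpr hmem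
          rw [List.count_cons_self] at hcnt
          omega
        rw [List.count_cons_of_ne hax] at hcnt
        exact congrArg Nat.succ (ih i' j' hi' hj' hcnt hix hjx)

theorem buildRank_keys (l : List String) : (buildRank l).keys = PySem.Set.ofList l := by
  unfold buildRank
  rw [PySem.Dict.keys_foldl_insert_key]
  simp [PySem.Set.update_nil_left, PySem.List.map_snd_enumerate]

theorem buildRank_get?_none (l : List String) (x : String) (hx : x ∉ l) :
    (buildRank l).get? x = none := by
  rw [PySem.Dict.get?_eq_none_iff_not_mem_keys, buildRank_keys]
  simpa [PySem.Set.mem_ofList] using hx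

theorem altLoop_eq_prefix (l : List String) :
    ∀ (cs : List Char) (k : Nat), (∀ c ∈ cs, l.count (String.ofList [c]) ≤ 1) →
      altLoop (buildRank l) cs (k : Int)
        = decide (((cs.map (fun c => String.ofList [c])).filter (fun x => l.contains x)) <+: l.drop k) := by
  intro cs
  induction cs with
  | nil => intro k _; simp [altLoop]
  | cons c rest ih =>
    intro k hcnt
    have hrest : ∀ c' ∈ rest, l.count (String.ofList [c']) ≤ 1 :=
      fun c' h => hcnt c' (List.mem_cons_of_mem c h)
    cases hget : (buildRank l).get? (String.ofList [c]) with
    | none =>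
      have hm : String.ofList [c] ∉ l := by
        intro hmem
        rcases List.getElem_of_mem hmem with ⟨j, hj, hje⟩
        have hc1 : l.count (String.ofList [c]) = 1 := by
          have := hcnt c List.mem_cons_self
          have h1 : 1 ≤ l.count (String.ofList [c]) := List.count_pos_iff.mpr hmem
          omega
        have := foldl_enum_get?_of_count_one (String.ofList [c]) l 0 PySem.Dict.empty j hj hje hc1
        rw [show ((PySem.List.enumerate l 0).foldl (fun d p => d.insert p.2 p.1) PySem.Dict.empty) = buildRank l from rfl, hget] at this
        simp at this
      have h1 : l.contains (String.ofList [c]) = false := by simpa using hm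
      simp only [altLoop, hget, List.map_cons, List.filter_cons, h1, Bool.false_eq_true, if_false]
      exact ih k hrest
    | some r =>
      have hm : String.ofList [c] ∈ l := by
        by_contra hmem
        rw [buildRank_get?_none l _ hmem] at hget
        simp at hget
      rcases List.getElem_of_mem hm with ⟨j, hj, hje⟩
      have hc1 : l.count (String.ofList [c]) = 1 := by
        have := hcnt c List.mem_cons_self
        have h1 : 1 ≤ l.count (String.ofList [c]) := List.count_pos_iff.mpr hm
        omega
      have hr : r = (j : Int) := by
        have := foldl_enum_get?_of_count_one (String.ofList [c]) l 0 PySem.Dict.empty j hj hje hc1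
        rw [show ((PySem.List.enumerate l 0).foldl (fun d p => d.insert p.2 p.1) PySem.Dict.empty) = buildRank l from rfl, hget] at this
        have h2 := Option.some.inj this
        rw [zero_add] at h2
        exact h2
      subst hr
      have h1 : l.contains (String.ofList [c]) = true := by simpa using hm
      by_cases hjk : j = k
      · subst hjk
        have hdrop : l.drop j = l[j] :: l.drop (j + 1) := List.drop_eq_getElem_cons hj
        simp only [altLoop, hget, List.map_cons, List.filter_cons, h1, ne_eq, not_true_eq_false]
        rw [if_neg (by simp)]
        have hrec := ih (j + 1) hrest
        push_cast at hrec
        rw [hrec, hdrop]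
        simp [hje, List.cons_prefix_cons]
      · have hne : (j : Int) ≠ (k : Int) := by exact_mod_cast hjk
        simp only [altLoop, hget, List.map_cons, List.filter_cons, h1, ne_eq, hne,
          not_false_eq_true, if_pos trivial]
        by_cases hk : k < l.length
        · have hdrop : l.drop k = l[k] :: l.drop (k + 1) := List.drop_eq_getElem_cons hk
          have hneq : l[k] ≠ String.ofList [c] := by
            intro hEq
            exact hjk (count_one_index_unique (String.ofList [c]) l j k hj hk hc1 hje hEq)
          refine (decide_eq_false ?_).symm
          rw [hdrop, List.cons_prefix_cons]
          rintro ⟨h1', -⟩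
          exact hneq h1'.symm
        · have hdrop : l.drop k = [] := List.drop_eq_nil_of_le (by omega)
          simp [hdrop]

-- ===== VERDICT (by name: the statement is the Claim_ definition above) =====
theorem is_able_spec : Claim_equal_is_able := by
  intro l s _ hpre
  unfold Spec_is_able is_able is_able_alt
  have h0 := altLoop_eq_prefix l s.toList 0 (pre_char_count l s hpre)
  simp only [Nat.cast_zero, List.drop_zero] at h0
  simp only [foldl_filter_append, List.nil_append, take_beq_iff_prefix, h0]
  split <;> simp_all
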